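-- pv_equiv track=rewrite | github.com/gratach/distrida | src/distrida/address_system/weg.py | wegZuUIntR
-- ===== SOURCE A (Python) =====
-- def wegZuUIntR(weg):
--     l = len(weg)
--     i = 0
--     mul = 1
--     ges = 0
--     while i < l:
--         ges += ((254 - weg[i]) + 1) * mul
--         mul *= 255
--         i += 1
--     return ges
-- ===== SOURCE B (Python) =====
-- def wegZuUIntR(weg):
--     ges = 0
--     for d in reversed(weg):
--         ges = ges * 255 + (255 - d)
--     return ges
-- ===== Notes on version B (the rewrite author's own statement) =====
-- stated objective: simpler
-- what changed: Replaces the index loop carrying an explicit running power-of-255 multiplier by a Horner-scheme fold over the reversed list, dropping the multiplier variable entirely.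
import Mathlib
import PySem

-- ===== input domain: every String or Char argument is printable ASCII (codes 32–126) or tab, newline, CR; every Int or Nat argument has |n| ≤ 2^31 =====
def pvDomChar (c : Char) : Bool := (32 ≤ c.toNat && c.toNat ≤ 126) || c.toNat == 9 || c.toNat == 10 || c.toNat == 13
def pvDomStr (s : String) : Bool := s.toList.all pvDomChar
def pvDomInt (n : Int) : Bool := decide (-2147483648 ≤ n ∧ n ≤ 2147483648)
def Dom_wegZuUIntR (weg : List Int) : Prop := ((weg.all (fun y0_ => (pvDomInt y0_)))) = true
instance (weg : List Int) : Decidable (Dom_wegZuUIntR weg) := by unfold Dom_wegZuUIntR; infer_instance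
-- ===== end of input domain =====

-- B replaces A's index loop with a running multiplier by a Horner-scheme fold over the reversed list (simpler decomposition, same O(n)).


-- ===== PORT A =====
-- A's while loop visits weg[0], weg[1], … in order, carrying (mul, ges); ported as a left fold over the list with that pair state.
def wegZuUIntR (weg : List Int) : Int :=
  (weg.foldl (fun (p : Int × Int) d => (p.1 * 255, p.2 + ((254 - d) + 1) * p.1)) (1, 0)).2

-- ===== PORT B =====
-- Horner's scheme over the reversed list, exactly Source B.
def wegZuUIntR_alt (weg : List Int) : Int :=
  weg.reverse.foldl (fun ges d => ges * 255 + (255 - d)) 0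

-- ===== PRECONDITION & SPEC =====
def Spec_wegZuUIntR (weg : List Int) (out : Int) : Prop := out = wegZuUIntR_alt weg
instance (weg : List Int) (out : Int) : Decidable (Spec_wegZuUIntR weg out) := by unfold Spec_wegZuUIntR; infer_instance

-- ===== CLAIM (what is proved, stated in full; the proofs are below) =====
def Claim_equal_wegZuUIntR : Prop := ∀ (weg : List Int), Dom_wegZuUIntR weg → Spec_wegZuUIntR weg (wegZuUIntR weg)

-- ===== LEMMAS AND PROOFS =====
theorem horner_cons (l : List Int) (d : Int) :
    wegZuUIntR_alt (d :: l) = wegZuUIntR_alt l * 255 + (255 - d) := by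
  simp [wegZuUIntR_alt, List.reverse_cons, List.foldl_append]

theorem loop_general (l : List Int) (mul ges : Int) :
    (l.foldl (fun (p : Int × Int) d => (p.1 * 255, p.2 + ((254 - d) + 1) * p.1)) (mul, ges)).2
      = ges + mul * wegZuUIntR_alt l := by
  induction l generalizing mul ges with
  | nil => simp [wegZuUIntR_alt]
  | cons d l ih =>
    simp only [List.foldl_cons, ih, horner_cons]
    ring

-- ===== VERDICT (by name: the statement is the Claim_ definition above) =====
theorem wegZuUIntR_spec : Claim_equal_wegZuUIntR := by
  intro weg _
  show wegZuUIntR weg = wegZuUIntR_alt weg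
  simp [wegZuUIntR, loop_general]
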